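-- pv_equiv track=rewrite | github.com/crane-9/cs271 | project_6/code.py | dest
-- ===== SOURCE A (Python) =====
-- def dest(mnemonic: str) -> str:
--     """
--     Translates the `dest` mnemonic string to a string of 3 bits.
--     :param mnemonic: The mnemonic to translate. Expects "A", "M", "D", or some combination.
--     :raises CodeError: If the mnemonic is not as expected.
--     :returns: 3 bits as a string.
--     """
--     # Initial destination information.
--     dest_a = False
--     dest_m = False
--     dest_d = False
--
--     for char in mnemonic:
--         # Raise error on unexpected character.
--         if char not in "AMD":  raise CodeError(f"Unexpected character in 'dest' token: {char}")
--
--         # Simple repetition.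
--         dest_a = dest_a or char == "A"
--         dest_m = dest_m or char == "M"
--         dest_d = dest_d or char == "D"  # Note that this method allows for "AAAAAAAAAAAAAAA" and "MMMMM" and "AMDMDMMD" to be valid tokens.
--
--     return ''.join([str(int(dest)) for dest in (dest_a, dest_d, dest_m)])
-- ===== SOURCE B (Python) =====
-- def dest(mnemonic: str) -> str:
--     for char in mnemonic:
--         if char not in "AMD":  raise CodeError(f"Unexpected character in 'dest' token: {char}")
--     return ''.join('1' if c in mnemonic else '0' for c in "ADM")
-- ===== Notes on version B (the rewrite author's own statement) =====
-- stated objective: simpler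
-- what changed: Replaces the three boolean flags accumulated inside the scan with a plain validation pass followed by a membership-based construction ''.join('1' if c in mnemonic else '0' for c in 'ADM').
import Mathlib
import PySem

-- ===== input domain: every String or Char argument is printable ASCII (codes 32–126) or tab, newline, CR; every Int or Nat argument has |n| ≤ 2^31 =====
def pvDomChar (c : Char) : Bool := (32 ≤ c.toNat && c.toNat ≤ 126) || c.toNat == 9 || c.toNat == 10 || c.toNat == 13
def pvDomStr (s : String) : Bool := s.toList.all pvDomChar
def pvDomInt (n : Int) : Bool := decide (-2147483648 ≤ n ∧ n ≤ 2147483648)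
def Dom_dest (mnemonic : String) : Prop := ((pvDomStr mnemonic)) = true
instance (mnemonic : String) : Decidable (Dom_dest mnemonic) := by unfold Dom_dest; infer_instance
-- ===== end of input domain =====

-- B replaces A's in-loop boolean-flag accumulation with a validation pass plus a
-- membership-based construction over "ADM" (objective: simpler decomposition).


-- ===== PORT A =====
-- the for-loop with the three flags; 'none' marks the CodeError raise
def destLoop : List Char → Bool → Bool → Bool → Option (Bool × Bool × Bool)
  | [], a, m, d => some (a, m, d)
  | c :: cs, a, m, d =>
    if ("AMD".toList.contains c) then
      destLoop cs (a || c == 'A') (m || c == 'M') (d || c == 'D')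
    else none

def dest (mnemonic : String) : String :=
  match destLoop mnemonic.toList false false false with
  | some (a, m, d) =>
      String.ofList (([a, d, m]).map (fun b => if b then '1' else '0'))
  | none => ""   -- A raises CodeError here; excluded by Pre_dest

-- ===== PORT B =====
-- separate validation pass (B's for-loop; false = the raise, excluded by Pre_dest)
def destValid : List Char → Bool
  | [] => true
  | c :: cs => if ("AMD".toList.contains c) then destValid cs else false

def dest_alt (mnemonic : String) : String :=
  if destValid mnemonic.toList then
    String.ofList ("ADM".toList.map (fun c => if mnemonic.toList.contains c then '1' else '0'))
  else ""

-- ===== PRECONDITION & SPEC =====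
-- Pre_ excludes exactly the inputs with a character outside "AMD", on which A raises CodeError.
def Pre_dest (mnemonic : String) : Prop :=
  mnemonic.toList.all (fun c => "AMD".toList.contains c) = true
instance (mnemonic : String) : Decidable (Pre_dest mnemonic) := by unfold Pre_dest; infer_instance
def pvWitness_dest : String := "AMD"
def Spec_dest (mnemonic : String) (out : String) : Prop := out = dest_alt mnemonic
instance (mnemonic : String) (out : String) : Decidable (Spec_dest mnemonic out) := by unfold Spec_dest; infer_instance

-- ===== CLAIM (what is proved, stated in full; the proofs are below) =====
def Claim_equal_dest : Prop := ∀ (mnemonic : String), Dom_dest mnemonic → Pre_dest mnemonic → Spec_dest mnemonic (dest mnemonic)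

-- ===== LEMMAS AND PROOFS =====
theorem destLoop_valid (cs : List Char) (a m d : Bool)
    (h : ∀ c ∈ cs, "AMD".toList.contains c = true) :
    destLoop cs a m d = some (a || cs.contains 'A', m || cs.contains 'M', d || cs.contains 'D') := by
  induction cs generalizing a m d with
  | nil => simp [destLoop]
  | cons c cs ih =>
    have hc := h c (by simp)
    rw [destLoop, if_pos hc, ih _ _ _ (fun x hx => h x (by simp [hx]))]
    simp [Bool.or_assoc, Bool.beq_eq_decide_eq, @eq_comm Char c]


theorem destValid_true (cs : List Char)
    (h : ∀ c ∈ cs, "AMD".toList.contains c = true) : destValid cs = true := by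
  induction cs with
  | nil => rfl
  | cons c cs ih =>
    rw [destValid, if_pos (h c (by simp))]
    exact ih (fun x hx => h x (by simp [hx]))

-- ===== VERDICT (by name: the statement is the Claim_ definition above) =====
theorem dest_spec : Claim_equal_dest := by
  intro mnemonic _ hpre
  unfold Pre_dest at hpre
  rw [List.all_eq_true] at hpre
  unfold Spec_dest dest dest_alt
  rw [destLoop_valid _ _ _ _ hpre, destValid_true _ hpre, if_pos rfl]
  simp
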